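-- pv_equiv track=rewrite | github.com/crazymaker1317/Music_In_Line | core/pitch_mapper.py | _get_scale_pitches
-- ===== SOURCE A (Python) =====
-- C_MAJOR_OFFSETS = [0, 2, 4, 5, 7, 9, 11]  # C, D, E, F, G, A, B
--
-- def _get_scale_pitches(pitch_min: int, pitch_max: int,
--                        scale: str = "C_major") -> list[int]:
--     """
--     지정된 범위 내에서 스케일에 속하는 MIDI pitch 목록을 생성합니다.
--
--     Args:
--         pitch_min: 최저 MIDI pitch
--         pitch_max: 최고 MIDI pitch
--         scale: 스케일 이름 (현재 "C_major"만 지원)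
--
--     Returns:
--         스케일에 속하는 MIDI pitch 리스트 (오름차순)
--     """
--     if scale != "C_major":
--         raise ValueError(f"지원하지 않는 스케일: {scale}. 현재 'C_major'만 지원됩니다.")
--
--     pitches = []
--     for midi_pitch in range(pitch_min, pitch_max + 1):
--         # MIDI pitch를 12로 나눈 나머지가 C 메이저 스케일 오프셋에 해당하는지 확인
--         if (midi_pitch % 12) in C_MAJOR_OFFSETS:
--             pitches.append(midi_pitch)
--     return pitches
-- ===== SOURCE B (Python) =====
-- C_MAJOR_OFFSETS = [0, 2, 4, 5, 7, 9, 11]  # C, D, E, F, G, A, B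
--
-- def _get_scale_pitches(pitch_min: int, pitch_max: int,
--                        scale: str = "C_major") -> list[int]:
--     """Pointer-jumping: start at the first scale pitch >= pitch_min and hop
--     scale-step by scale-step (whole/half steps), never visiting non-scale pitches."""
--     if scale != "C_major":
--         raise ValueError(f"지원하지 않는 스케일: {scale}. 현재 'C_major'만 지원됩니다.")
--
--     # first C-major pitch >= pitch_min (non-scale residues are isolated, so +1 suffices)
--     p = pitch_min if pitch_min % 12 in C_MAJOR_OFFSETS else pitch_min + 1
--     pitches = []
--     while p <= pitch_max:
--         pitches.append(p)
--         p += 1 if p % 12 in (4, 11) else 2  # half step after E and B, whole step otherwise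
--     return pitches
-- ===== Notes on version B (the rewrite author's own statement) =====
-- stated objective: faster
-- what changed: Replaces the per-semitone scan with a modulo/membership test on every pitch by a pointer-jumping walk: snap to the first in-scale pitch, then hop directly from scale note to scale note by whole/half steps, never visiting non-scale pitches and testing no membership per emitted note.
import Mathlib
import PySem

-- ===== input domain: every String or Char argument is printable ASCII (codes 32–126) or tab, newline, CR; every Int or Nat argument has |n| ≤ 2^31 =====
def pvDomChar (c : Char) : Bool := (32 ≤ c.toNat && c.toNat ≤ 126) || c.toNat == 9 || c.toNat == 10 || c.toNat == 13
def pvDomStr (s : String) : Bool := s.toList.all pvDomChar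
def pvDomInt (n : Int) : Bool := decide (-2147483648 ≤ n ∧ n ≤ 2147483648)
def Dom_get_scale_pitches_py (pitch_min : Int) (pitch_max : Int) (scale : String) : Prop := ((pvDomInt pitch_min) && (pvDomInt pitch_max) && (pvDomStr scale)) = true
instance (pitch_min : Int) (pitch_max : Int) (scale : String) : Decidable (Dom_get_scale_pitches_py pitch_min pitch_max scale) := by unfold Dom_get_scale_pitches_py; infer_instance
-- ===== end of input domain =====

-- B replaces A's per-semitone scan (a modulo/membership test on every pitch in range) by a
-- pointer-jumping walk that hops from scale note to scale note by whole/half steps.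

-- C_MAJOR_OFFSETS, shared module-level constant of both versions
def cMajorOffsets : List Int := [0, 2, 4, 5, 7, 9, 11]

-- ===== PORT A =====
def get_scale_pitches_py (pitch_min : Int) (pitch_max : Int) (scale : String) : List Int :=
  if scale ≠ "C_major" then []  -- Python raises ValueError here; excluded by Pre_
  else
    (PySem.List.pyRange pitch_min (pitch_max + 1)).foldl
      (fun pitches midi_pitch =>
        if PySem.Int.mod midi_pitch 12 ∈ cMajorOffsets then pitches ++ [midi_pitch]
        else pitches) []

-- ===== PORT B =====
-- the 'while p <= pitch_max' loop of Source B; terminates because each hop advances p by ≥ 1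
def bWalk (pitch_max : Int) (p : Int) : List Int :=
  if _h : p ≤ pitch_max then
    p :: bWalk pitch_max
      (p + (if PySem.Int.mod p 12 = 4 ∨ PySem.Int.mod p 12 = 11 then 1 else 2))
  else []
termination_by (pitch_max + 1 - p).toNat
decreasing_by split_ifs <;> omega

def get_scale_pitches_py_alt (pitch_min : Int) (pitch_max : Int) (scale : String) : List Int :=
  if scale ≠ "C_major" then []  -- Python raises ValueError here; excluded by Pre_
  else
    bWalk pitch_max
      (if PySem.Int.mod pitch_min 12 ∈ cMajorOffsets then pitch_min else pitch_min + 1)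

-- ===== PRECONDITION & SPEC =====
-- Pre_ excludes exactly the inputs where A raises ValueError (any scale other than "C_major").
def Pre_get_scale_pitches_py (pitch_min : Int) (pitch_max : Int) (scale : String) : Prop :=
  scale = "C_major"
instance (pitch_min : Int) (pitch_max : Int) (scale : String) : Decidable (Pre_get_scale_pitches_py pitch_min pitch_max scale) := by unfold Pre_get_scale_pitches_py; infer_instance

def pvWitness_get_scale_pitches_py : Int × Int × String := (-5, 14, "C_major")

def Spec_get_scale_pitches_py (pitch_min : Int) (pitch_max : Int) (scale : String) (out : List Int) : Prop := out = get_scale_pitches_py_alt pitch_min pitch_max scale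
instance (pitch_min : Int) (pitch_max : Int) (scale : String) (out : List Int) : Decidable (Spec_get_scale_pitches_py pitch_min pitch_max scale out) := by unfold Spec_get_scale_pitches_py; infer_instance

-- ===== CLAIM (what is proved, stated in full; the proofs are below) =====
def Claim_equal_get_scale_pitches_py : Prop := ∀ (pitch_min : Int) (pitch_max : Int) (scale : String), Dom_get_scale_pitches_py pitch_min pitch_max scale → Pre_get_scale_pitches_py pitch_min pitch_max scale → Spec_get_scale_pitches_py pitch_min pitch_max scale (get_scale_pitches_py pitch_min pitch_max scale)

-- ===== LEMMAS AND PROOFS =====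

-- A's loop is the filter of the semitone range
theorem a_eq_filter (pm px : Int) :
    get_scale_pitches_py pm px "C_major"
      = (PySem.List.pyRange pm (px + 1)).filter
          (fun q => decide (q % 12 ∈ cMajorOffsets)) := by
  unfold get_scale_pitches_py
  rw [if_neg (by simp)]
  have h := PySem.List.foldl_append_ite_eq_filter
    (fun q => PySem.Int.mod q 12 ∈ cMajorOffsets) (PySem.List.pyRange pm (px + 1)) ([] : List Int)
  simp only [PySem.Int.mod_eq_emod_of_pos (by norm_num : (0:Int) < 12)] at h
  simpa using h

-- B's walk from an in-scale pitch produces exactly the in-scale pitches of [p, px]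
theorem bWalk_eq_filter (px : Int) (p : Int) :
    p % 12 ∈ cMajorOffsets →
    bWalk px p = (PySem.List.pyRange p (px + 1)).filter
        (fun q => decide (q % 12 ∈ cMajorOffsets)) := by
  induction p using bWalk.induct (pitch_max := px) with
  | case2 p h =>
    intro _
    rw [bWalk, dif_neg h, PySem.List.pyRange_one_eq_nil (by omega)]
    simp
  | case1 p h ih =>
    intro hp
    simp only [cMajorOffsets, List.mem_cons, List.not_mem_nil, or_false] at hp
    rw [bWalk, dif_pos h, PySem.List.pyRange_one_cons (by omega : p < px + 1)]
    rw [List.filter_cons_of_pos (by simp [cMajorOffsets]; omega)]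
    rw [PySem.Int.mod_eq_emod_of_pos (by norm_num : (0:Int) < 12)] at ih ⊢
    by_cases hc : p % 12 = 4 ∨ p % 12 = 11
    · -- half step: the next semitone is itself in scale
      rw [dif_pos hc] at ih
      rw [if_pos hc, ih (by simp [cMajorOffsets]; omega)]
    · -- whole step: the skipped semitone p+1 is not in scale
      rw [dif_neg hc] at ih
      rw [if_neg hc, ih (by simp [cMajorOffsets]; omega)]
      by_cases h1 : p + 1 < px + 1
      · rw [PySem.List.pyRange_one_cons h1,
          List.filter_cons_of_neg (by simp [cMajorOffsets]; omega)]
        ring_nf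
      · rw [PySem.List.pyRange_one_eq_nil (by omega),
          PySem.List.pyRange_one_eq_nil (by omega)]
  
-- assembling: B's snapped start drops no in-scale pitch
theorem main_eq (pm px : Int) :
    get_scale_pitches_py pm px "C_major" = get_scale_pitches_py_alt pm px "C_major" := by
  unfold get_scale_pitches_py_alt
  rw [if_neg (by simp), a_eq_filter]
  rw [PySem.Int.mod_eq_emod_of_pos (by norm_num : (0:Int) < 12)]
  by_cases hm : pm % 12 ∈ cMajorOffsets
  · rw [if_pos hm, bWalk_eq_filter px pm hm]
  · rw [if_neg hm]
    simp only [cMajorOffsets, List.mem_cons, List.not_mem_nil, or_false] at hm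
    push Not at hm
    rw [bWalk_eq_filter px (pm + 1) (by simp [cMajorOffsets]; omega)]
    by_cases h1 : pm < px + 1
    · rw [PySem.List.pyRange_one_cons h1,
        List.filter_cons_of_neg (by simp [cMajorOffsets]; omega)]
    · rw [PySem.List.pyRange_one_eq_nil (by omega),
        PySem.List.pyRange_one_eq_nil (by omega)]

-- ===== VERDICT (by name: the statement is the Claim_ definition above) =====
theorem get_scale_pitches_py_spec : Claim_equal_get_scale_pitches_py := by
  intro pm px scale _ hpre
  unfold Spec_get_scale_pitches_py
  subst hpre
  exact main_eq pm px
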